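-- pv_equiv track=rewrite | github.com/Makaze/advent-of-code | 2023/12/advent12.py | consecutive_groups
-- ===== SOURCE A (Python) =====
-- def consecutive_groups(lst):
--     if not lst:
--         return dict()
--     start = lst[0]
--     end = lst[0]
--     result = {start: 1}
--     l = 1
--     for i, num in enumerate(lst[1:]):
--         if num == end + 1:
--             l += 1
--         else:
--             result[start] = l
--             start = num
--             l = 1
--         end = num
--     result[start] = l
--     return result
-- ===== SOURCE B (Python) =====
-- def consecutive_groups(lst):
--     starts = [i for i in range(len(lst)) if i == 0 or lst[i] != lst[i - 1] + 1]
--     bounds = starts + [len(lst)]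
--     return {lst[s]: e - s for s, e in zip(bounds, bounds[1:])}
-- ===== Notes on version B (the rewrite author's own statement) =====
-- stated objective: idiomatic
-- what changed: Replaced A's single-pass start/end/length state machine with a two-phase computation: collect run-boundary indices (i == 0 or lst[i] != lst[i-1]+1), then build the dict in one comprehension from adjacent boundary pairs.
import Mathlib
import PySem

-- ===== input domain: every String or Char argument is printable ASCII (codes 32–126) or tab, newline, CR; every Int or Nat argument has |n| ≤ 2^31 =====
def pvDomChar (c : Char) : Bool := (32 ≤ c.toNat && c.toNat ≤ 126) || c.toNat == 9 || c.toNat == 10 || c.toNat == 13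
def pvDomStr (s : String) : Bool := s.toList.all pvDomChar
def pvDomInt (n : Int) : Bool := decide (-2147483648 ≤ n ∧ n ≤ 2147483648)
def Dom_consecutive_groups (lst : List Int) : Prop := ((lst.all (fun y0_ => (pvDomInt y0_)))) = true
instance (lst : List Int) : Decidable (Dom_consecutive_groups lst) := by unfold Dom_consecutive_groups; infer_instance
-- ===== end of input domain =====

-- B replaces A's running start/end/length state machine by run-boundary indices plus a dict comprehension (objective: idiomatic); same O(n) cost.

-- ===== PORT A =====
-- state = (start, end, result, l); the loop is 'for num in lst[1:]' (the enumerate index i is unused, so it is not carried)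
def consecutive_groups (lst : List Int) : List (Int × Int) :=
  match lst with
  | [] => []
  | x :: rest =>
    let s := rest.foldl
      (fun (s : Int × Int × PySem.Dict Int Int × Int) num =>
        if num = s.2.1 + 1 then (s.1, num, s.2.2.1, s.2.2.2 + 1)
        else (num, num, s.2.2.1.insert s.1 s.2.2.2, 1))
      (x, x, PySem.Dict.empty.insert x 1, 1)
    (s.2.2.1.insert s.1 s.2.2.2).items

-- ===== PORT B =====
-- starts = run-start indices; bounds = starts + [len]; dict comprehension over adjacent bound pairs.
-- all indices are in range, so List.getD is exact for lst[i]; the 'i == 0' disjunct shields lst[i-1] exactly as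
-- Python's short-circuit 'or' does.
def consecutive_groups_alt (lst : List Int) : List (Int × Int) :=
  let starts := (List.range lst.length).filter
    (fun i => i == 0 || !(lst.getD i 0 == lst.getD (i - 1) 0 + 1))
  let bounds := starts ++ [lst.length]
  ((bounds.zip bounds.tail).foldl
    (fun (d : PySem.Dict Int Int) p => d.insert (lst.getD p.1 0) ((p.2 : Int) - (p.1 : Int)))
    PySem.Dict.empty).items

-- ===== PRECONDITION & SPEC =====
def Spec_consecutive_groups (lst : List Int) (out : List (Int × Int)) : Prop := out = consecutive_groups_alt lst
instance (lst : List Int) (out : List (Int × Int)) : Decidable (Spec_consecutive_groups lst out) := by unfold Spec_consecutive_groups; infer_instance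

-- ===== CLAIM (what is proved, stated in full; the proofs are below) =====
def Claim_equal_consecutive_groups : Prop := ∀ (lst : List Int), Dom_consecutive_groups lst → Spec_consecutive_groups lst (consecutive_groups lst)

-- ===== LEMMAS AND PROOFS =====

-- the maximal run continuing prev (elements taken while each equals predecessor+1) and the remainder
def splitRun (prev : Int) : List Int → List Int × List Int
  | [] => ([], [])
  | x :: xs => if x = prev + 1 then let p := splitRun x xs; (x :: p.1, p.2) else ([], x :: xs)

theorem splitRun_snd_length : ∀ (prev : Int) (xs : List Int), (splitRun prev xs).2.length ≤ xs.length := by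
  intro prev xs
  induction xs generalizing prev with
  | nil => simp [splitRun]
  | cons x xs ih =>
    simp only [splitRun]
    split
    · exact Nat.le_succ_of_le (ih x)
    · simp

-- the list of maximal consecutive runs
def runs : List Int → List (List Int)
  | [] => []
  | x :: xs => (x :: (splitRun x xs).1) :: runs (splitRun x xs).2
termination_by xs => xs.length
decreasing_by
  simp only [List.length_cons, Nat.lt_succ_iff]
  exact splitRun_snd_length x xs

theorem runs_nil : runs [] = [] := by simp [runs]

theorem runs_cons (x : Int) (xs : List Int) :
    runs (x :: xs) = (x :: (splitRun x xs).1) :: runs (splitRun x xs).2 := by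
  rw [runs]

-- one dict write per run: d[head] = len(run)
def insRun (d : PySem.Dict Int Int) (g : List Int) : PySem.Dict Int Int :=
  d.insert (g.headD 0) (g.length : Int)

-- A's loop continued from state (start, e, d, l), followed by the final write
def afterA (xs : List Int) (start e : Int) (d : PySem.Dict Int Int) (l : Int) : PySem.Dict Int Int :=
  let s := xs.foldl
      (fun (s : Int × Int × PySem.Dict Int Int × Int) num =>
        if num = s.2.1 + 1 then (s.1, num, s.2.2.1, s.2.2.2 + 1)
        else (num, num, s.2.2.1.insert s.1 s.2.2.2, 1))
      (start, e, d, l)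
  s.2.2.1.insert s.1 s.2.2.2

theorem afterA_eq_runs : ∀ (xs : List Int) (start e : Int) (d : PySem.Dict Int Int) (l : Int),
    afterA xs start e d l
      = (runs (splitRun e xs).2).foldl insRun (d.insert start (l + ((splitRun e xs).1.length : Int))) := by
  intro xs
  induction xs with
  | nil => intro start e d l; simp [afterA, splitRun, runs_nil]
  | cons x xs ih =>
    intro start e d l
    by_cases hx : x = e + 1
    · have h1 : afterA (x :: xs) start e d l = afterA xs start x d (l + 1) := by
        simp [afterA, hx]
      rw [h1, ih]
      simp only [splitRun, if_pos hx, List.length_cons]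
      congr 2
      push_cast
      ring
    · have h1 : afterA (x :: xs) start e d l = afterA xs x x (d.insert start l) 1 := by
        simp [afterA, hx]
      rw [h1, ih]
      simp only [splitRun, if_neg hx]
      rw [runs_cons]
      simp only [List.foldl_cons, insRun, List.headD_cons, List.length_cons]
      congr 3
      · simp
      · push_cast; ring

-- the A port, via runs
theorem consecutive_groups_eq_runs : ∀ (lst : List Int),
    consecutive_groups lst = ((runs lst).foldl insRun PySem.Dict.empty).items := by
  intro lst
  match lst with
  | [] => simp [consecutive_groups, runs_nil, PySem.Dict.empty]
  | x :: xs =>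
    have h1 : consecutive_groups (x :: xs) = (afterA xs x x (PySem.Dict.empty.insert x 1) 1).items := rfl
    rw [h1, afterA_eq_runs, runs_cons]
    simp only [List.foldl_cons, insRun, List.headD_cons, List.length_cons,
      PySem.Dict.insert_insert_self]
    congr 4
    push_cast
    ring

-- ===== B side =====

def bP (lst : List Int) (i : Nat) : Bool := i == 0 || !(lst.getD i 0 == lst.getD (i - 1) 0 + 1)

def bBounds (lst : List Int) : List Nat :=
  ((List.range lst.length).filter (bP lst)) ++ [lst.length]

def bCore (d : PySem.Dict Int Int) (lst : List Int) : PySem.Dict Int Int :=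
  ((bBounds lst).zip (bBounds lst).tail).foldl
    (fun (d : PySem.Dict Int Int) p => d.insert (lst.getD p.1 0) ((p.2 : Int) - (p.1 : Int))) d

theorem alt_eq_bCore (lst : List Int) : consecutive_groups_alt lst = (bCore PySem.Dict.empty lst).items := rfl

-- the captured run is the arithmetic progression prev+1, prev+2, …
theorem splitRun_fst_getD : ∀ (xs : List Int) (prev : Int) (j : Nat), j < (splitRun prev xs).1.length →
    (splitRun prev xs).1.getD j 0 = prev + 1 + j := by
  intro xs
  induction xs with
  | nil => intro prev j h; simp [splitRun] at h
  | cons x xs ih =>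
    intro prev j h
    by_cases hx : x = prev + 1
    · simp only [splitRun, if_pos hx, List.length_cons] at h ⊢
      match j with
      | 0 => simpa using hx
      | j + 1 =>
        rw [List.getD_cons_succ, ih x j (by omega), hx]
        push_cast
        ring
    · simp [splitRun, if_neg hx] at h
    
-- maximality: the remainder does not continue the run
theorem splitRun_snd_head : ∀ (xs : List Int) (prev : Int) (y : Int) (ys : List Int),
    (splitRun prev xs).2 = y :: ys → y ≠ prev + 1 + ((splitRun prev xs).1.length : Int) := by
  intro xs
  induction xs with
  | nil => intro prev y ys h; simp [splitRun] at h
  | cons x xs ih =>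
    intro prev y ys h
    by_cases hx : x = prev + 1
    · simp only [splitRun, if_pos hx, List.length_cons] at h ⊢
      have := ih x y ys h
      intro hc
      apply this
      rw [hx] at hc ⊢
      push_cast at hc ⊢
      linarith
    · simp only [splitRun, if_neg hx] at h ⊢
      injection h with h1 h2
      simpa [← h1] using hx

-- the whole run x :: (splitRun x xs).1, indexed
theorem run_getD (x : Int) (xs : List Int) (j : Nat) (hj : j < (splitRun x xs).1.length + 1) :
    (x :: (splitRun x xs).1).getD j 0 = x + j := by
  match j with
  | 0 => simp
  | j + 1 =>
    rw [List.getD_cons_succ, splitRun_fst_getD xs x j (by omega)]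
    push_cast
    ring

theorem splitRun_append : ∀ (xs : List Int) (prev : Int), xs = (splitRun prev xs).1 ++ (splitRun prev xs).2 := by
  intro xs
  induction xs with
  | nil => intro prev; simp [splitRun]
  | cons x xs ih =>
    intro prev
    by_cases hx : x = prev + 1
    · simp only [splitRun, if_pos hx, List.cons_append]
      exact congrArg (x :: ·) (ih x)
    · simp [splitRun, if_neg hx]

theorem run_append (x : Int) (xs : List Int) :
    x :: xs = (x :: (splitRun x xs).1) ++ (splitRun x xs).2 := by
  simp only [List.cons_append]
  exact congrArg (x :: ·) (splitRun_append xs x)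

-- filter over an initial range where only 0 passes
theorem filter_range_eq_zero (m : Nat) (hm : 0 < m) (f : Nat → Bool) (h0 : f 0 = true)
    (h : ∀ i, 0 < i → i < m → f i = false) : (List.range m).filter f = [0] := by
  obtain ⟨m', rfl⟩ : ∃ m', m = m' + 1 := ⟨m - 1, by omega⟩
  rw [List.range_succ_eq_map, List.filter_cons_of_pos h0, List.filter_map]
  suffices hs : (List.range m').filter (f ∘ Nat.succ) = [] by rw [hs]; rfl
  rw [List.filter_eq_nil_iff]
  intro i hi
  simp only [Function.comp, Nat.succ_eq_add_one]
  simp only [List.mem_range] at hi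
  simp [h (i + 1) (by omega) (by omega)]

-- bBounds always starts with 0
theorem bBounds_eq_cons : ∀ (lst : List Int), bBounds lst = 0 :: (bBounds lst).tail := by
  intro lst
  cases lst with
  | nil => rfl
  | cons x xs =>
    rw [bBounds]
    simp only [List.length_cons, List.range_succ_eq_map]
    rw [List.filter_cons_of_pos (by simp [bP])]
    rfl

theorem bP_shift (x : Int) (xs : List Int) (i : Nat) (hi : i < (splitRun x xs).2.length) :
    bP (x :: xs) ((splitRun x xs).1.length + 1 + i) = bP (splitRun x xs).2 i := by
  have happ := run_append x xs
  have hget : ∀ a : Nat, (x :: xs).getD ((splitRun x xs).1.length + 1 + a) 0 = (splitRun x xs).2.getD a 0 := by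
    intro a
    rw [happ, List.getD_append_right _ _ _ _ (by simp only [List.length_cons]; omega)]
    congr 1
    simp only [List.length_cons]
    omega
  match i with
  | 0 =>
    cases hr : (splitRun x xs).2 with
    | nil => rw [hr] at hi; simp at hi
    | cons y ys =>
      have hne : y ≠ x + 1 + ((splitRun x xs).1.length : Int) := splitRun_snd_head xs x y ys hr
      have h1 : (x :: xs).getD ((splitRun x xs).1.length + 1 + 0) 0 = y := by
        rw [hget 0, hr]; rfl
      have h2 : (x :: xs).getD ((splitRun x xs).1.length + 1 + 0 - 1) 0
          = x + ((splitRun x xs).1.length : Int) := by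
        rw [happ, List.getD_append _ _ _ _ (by simp)]
        rw [show (splitRun x xs).1.length + 1 + 0 - 1 = (splitRun x xs).1.length from by omega]
        exact run_getD x xs (splitRun x xs).1.length (by omega)
      simp only [bP, h1, h2]
      have hne' : ¬ (y = x + ((splitRun x xs).1.length : Int) + 1) := by
        intro hc; exact hne (by linarith)
      simp [hne']
  | i + 1 =>
    have h1 := hget (i + 1)
    have h2 : (x :: xs).getD ((splitRun x xs).1.length + 1 + (i + 1) - 1) 0
        = (splitRun x xs).2.getD i 0 := by
      rw [show (splitRun x xs).1.length + 1 + (i + 1) - 1 = (splitRun x xs).1.length + 1 + i from by omega]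
      exact hget i
    simp only [bP, h1, h2]
    simp

theorem bBounds_decomp (x : Int) (xs : List Int) :
    bBounds (x :: xs) = 0 :: (bBounds (splitRun x xs).2).map ((splitRun x xs).1.length + 1 + ·) := by
  have happ := run_append x xs
  have hlen : (x :: xs).length = ((splitRun x xs).1.length + 1) + (splitRun x xs).2.length := by
    rw [happ]; simp; omega
  have hfirst : (List.range ((splitRun x xs).1.length + 1)).filter (bP (x :: xs)) = [0] := by
    apply filter_range_eq_zero _ (by omega) _ (by simp [bP])
    intro i h0 hilt
    have hgi : (x :: xs).getD i 0 = x + i := by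
      rw [happ, List.getD_append _ _ _ _ (by simp; omega)]
      exact run_getD x xs i (by omega)
    have hgi1 : (x :: xs).getD (i - 1) 0 = x + ((i - 1 : Nat) : Int) := by
      rw [happ, List.getD_append _ _ _ _ (by simp; omega)]
      exact run_getD x xs (i - 1) (by omega)
    simp only [bP, hgi, hgi1]
    have hv : x + (i : Int) = x + ((i - 1 : Nat) : Int) + 1 := by
      have : ((i - 1 : Nat) : Int) = (i : Int) - 1 := by omega
      rw [this]; ring
    simp [h0.ne', hv]
  have hsecond : ((List.range (splitRun x xs).2.length).map ((splitRun x xs).1.length + 1 + ·)).filter (bP (x :: xs))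
      = ((List.range (splitRun x xs).2.length).filter (bP (splitRun x xs).2)).map ((splitRun x xs).1.length + 1 + ·) := by
    rw [List.filter_map]
    congr 1
    apply List.filter_congr
    intro i hi
    simp only [List.mem_range] at hi
    simpa [Function.comp] using bP_shift x xs i hi
  calc bBounds (x :: xs)
      = ((List.range (((splitRun x xs).1.length + 1) + (splitRun x xs).2.length)).filter (bP (x :: xs)))
          ++ [((splitRun x xs).1.length + 1) + (splitRun x xs).2.length] := by
        rw [bBounds, hlen]
    _ = ([0] ++ ((List.range (splitRun x xs).2.length).filter (bP (splitRun x xs).2)).map ((splitRun x xs).1.length + 1 + ·))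
          ++ [((splitRun x xs).1.length + 1) + (splitRun x xs).2.length] := by
        rw [List.range_add, List.filter_append, hfirst, hsecond]
    _ = 0 :: (bBounds (splitRun x xs).2).map ((splitRun x xs).1.length + 1 + ·) := by
        simp [bBounds, List.map_append]

theorem map_zip_tail (f : Nat → Nat) (L : List Nat) :
    (L.map f).zip (L.map f).tail = (L.zip L.tail).map (fun p => (f p.1, f p.2)) := by
  have h : (L.map f).tail = L.tail.map f := by cases L <;> rfl
  rw [h, List.zip_map]
  rfl

theorem bCore_eq : ∀ (lst : List Int) (d : PySem.Dict Int Int),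
    bCore d lst = (runs lst).foldl insRun d := by
  intro lst
  induction lst using runs.induct with
  | case1 => intro d; simp [bCore, bBounds, runs_nil]
  | case2 x xs ih =>
    intro d
    have ht := bBounds_eq_cons (splitRun x xs).2
    have key : (bBounds (x :: xs)).zip (bBounds (x :: xs)).tail
        = (0, (splitRun x xs).1.length + 1 + 0)
            :: ((bBounds (splitRun x xs).2).zip (bBounds (splitRun x xs).2).tail).map
                (fun p => ((splitRun x xs).1.length + 1 + p.1, (splitRun x xs).1.length + 1 + p.2)) := by
      have h3 := map_zip_tail (fun j => (splitRun x xs).1.length + 1 + j) (bBounds (splitRun x xs).2)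
      have h4 : (bBounds (splitRun x xs).2).tail.map (fun j => (splitRun x xs).1.length + 1 + j)
          = ((bBounds (splitRun x xs).2).map (fun j => (splitRun x xs).1.length + 1 + j)).tail := by
        conv_rhs => rw [ht]
        simp
      rw [bBounds_decomp x xs, List.tail_cons]
      conv_lhs => rw [ht, List.map_cons, List.zip_cons_cons, ← List.map_cons, ← ht, h4]
      rw [h3]
    rw [runs_cons, List.foldl_cons]
    rw [← ih (insRun d (x :: (splitRun x xs).1))]
    rw [bCore, bCore, key, List.foldl_cons, List.foldl_map]
    have hfst : d.insert ((x :: xs).getD 0 0)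
          ((((splitRun x xs).1.length + 1 + 0 : Nat) : Int) - ((0 : Nat) : Int))
        = insRun d (x :: (splitRun x xs).1) := by
      simp only [insRun, List.headD_cons, List.getD_cons_zero, List.length_cons, Nat.add_zero]
      congr 1
    rw [hfst]
    apply List.foldl_ext
    intro d' p hp
    have hget : (x :: xs).getD ((splitRun x xs).1.length + 1 + p.1) 0
        = (splitRun x xs).2.getD p.1 0 := by
      rw [run_append x xs, List.getD_append_right _ _ _ _ (by simp only [List.length_cons]; omega)]
      congr 1
      simp only [List.length_cons]
      omega
    simp only []
    rw [hget]
    congr 1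
    push_cast
    ring

-- ===== VERDICT (by name: the statement is the Claim_ definition above) =====
theorem consecutive_groups_spec : Claim_equal_consecutive_groups := by
  intro lst _
  unfold Spec_consecutive_groups
  rw [consecutive_groups_eq_runs, alt_eq_bCore, bCore_eq]
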